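-- pv_equiv track=rewrite | github.com/Giorgos-Panagiotakopoulos/Big_Data_Processing_Techniques_and_Tools | Project/neighborcells.py | neighborCellsStr
-- ===== SOURCE A (Python) =====
-- def neighborCellsStr(H, W, bin):
--     n1 = -1
--     n2 = -1
--     n5 = -1
--     n3 = -1
--     n4 = -1
--     n6 = -1
--     n7 = -1
--     n8 = -1
--
--     n1 = bin + H
--     # bin not in upper row
--     if bin % H < H - 1:
--         n2 = bin + H + 1
--     # bin not in lower row
--     if bin % H != 0:
--         n3 = bin + H - 1
--     # bin not in upper row
--     n4 = bin - H
--
--     # bin not in upper row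
--     if bin % H < H - 1:
--         n5 = bin - H + 1
--
--     # bin not in lower row
--     if bin % H != 0:
--         n6 = bin - H - 1
--
--     # bin not in upper row
--     if bin % H < H - 1:
--         n7 = bin + 1
--
--     if bin % H != 0:
--         n8 = bin - 1
--
--     neighbors = []
--     s = ""
--     if n1 >= 0 and n1 <= W * H - 1:
--         neighbors.append(n1)
--     if n2 >= 0 and n2 <= W * H - 1:
--         neighbors.append(n2)
--     if n3 >= 0 and n3 <= W * H - 1:
--         neighbors.append(n3)
--     if n4 >= 0 and n4 <= W * H - 1:
--         neighbors.append(n4)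
--     if n5 >= 0 and n5 <= W * H - 1:
--         neighbors.append(n5)
--     if n6 >= 0 and n6 <= W * H - 1:
--         neighbors.append(n6)
--     if n7 >= 0 and n7 <= W * H - 1:
--         neighbors.append(n7)
--     if n8 >= 0 and n8 <= W * H - 1:
--         neighbors.append(n8)
--     neighbors.sort()
--     for item in neighbors:
--         s = s + str(item) + ", "
--     s = s.strip(", ")
--     return s
-- ===== SOURCE B (Python) =====
-- def neighborCellsStr(H, W, bin):
--     # Derive 2D position, clamp the 3x3 window to the grid, and walk it in
--     # (column, row) order: indices come out already sorted, so no sort is needed.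
--     row = bin % H
--     col = bin // H
--     out = []
--     for c in range(max(col - 1, 0), min(col + 1, W - 1) + 1):
--         for r in range(max(row - 1, 0), min(row + 1, H - 1) + 1):
--             if c != col or r != row:
--                 out.append(str(c * H + r))
--     return ", ".join(out)
-- ===== Notes on version B (the rewrite author's own statement) =====
-- stated objective: alternative
-- what changed: B replaces A's eight hard-coded flat-index candidates, the flat 0..W*H-1 range filter and the final sort by a clamped 3x3-window traversal: row = bin % H, col = bin // H, nested ranges over the clamped column then row interval emit the neighbor indices already in ascending order, so the sort pass disappears.
-- outside the precondition, e.g. on neighborCellsStr(-1, -3, 1): A returns '0, 2', B returns ''; on neighborCellsStr(0, 3, 1): A raises ZeroDivisionError, B raises ZeroDivisionError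
import Mathlib
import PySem

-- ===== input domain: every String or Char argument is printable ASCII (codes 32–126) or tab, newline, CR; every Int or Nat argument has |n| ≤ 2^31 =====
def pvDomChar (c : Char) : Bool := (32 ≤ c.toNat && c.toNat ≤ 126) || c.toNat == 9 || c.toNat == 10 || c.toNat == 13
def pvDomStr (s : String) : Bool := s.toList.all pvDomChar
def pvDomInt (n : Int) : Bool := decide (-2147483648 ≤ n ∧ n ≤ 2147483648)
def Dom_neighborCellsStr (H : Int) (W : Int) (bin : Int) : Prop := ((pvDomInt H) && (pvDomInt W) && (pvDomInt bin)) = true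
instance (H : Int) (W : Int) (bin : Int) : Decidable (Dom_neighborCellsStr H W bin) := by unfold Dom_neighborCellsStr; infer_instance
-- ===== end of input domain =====

-- B replaces A's eight hard-coded flat-index candidates filtered by a flat 0..W*H-1 range test and a sort
-- with a clamped 3x3-window traversal in (column,row) order that emits the indices already sorted (no sort pass).


-- ===== PORT A =====
def neighborCellsStr (H : Int) (W : Int) (bin : Int) : String :=
  let n1 : Int := bin + H
  let n2 : Int := if PySem.Int.mod bin H < H - 1 then bin + H + 1 else -1
  let n3 : Int := if PySem.Int.mod bin H ≠ 0 then bin + H - 1 else -1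
  let n4 : Int := bin - H
  let n5 : Int := if PySem.Int.mod bin H < H - 1 then bin - H + 1 else -1
  let n6 : Int := if PySem.Int.mod bin H ≠ 0 then bin - H - 1 else -1
  let n7 : Int := if PySem.Int.mod bin H < H - 1 then bin + 1 else -1
  let n8 : Int := if PySem.Int.mod bin H ≠ 0 then bin - 1 else -1
  -- the eight sequential 'if 0 <= ni <= W*H-1: neighbors.append(ni)' tests, in order
  let neighbors : List Int :=
    [n1, n2, n3, n4, n5, n6, n7, n8].filter (fun n => decide (0 ≤ n) && decide (n ≤ W * H - 1))
  let sortedNs : List Int := PySem.List.sorted neighbors (fun x => x) false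
  let s : String := sortedNs.foldl (fun s item => s ++ PySem.Int.toStr item ++ ", ") ""
  PySem.Str.stripChars s ", "

-- ===== PORT B =====
def neighborCellsStr_alt (H : Int) (W : Int) (bin : Int) : String :=
  let row : Int := PySem.Int.mod bin H
  let col : Int := PySem.Int.floordiv bin H
  -- nested 'for c in range(...): for r in range(...): if c != col or r != row: out.append(str(c*H+r))'
  let out : List String :=
    (PySem.List.pyRange (max (col - 1) 0) (min (col + 1) (W - 1) + 1) 1).flatMap
      (fun c =>
        ((PySem.List.pyRange (max (row - 1) 0) (min (row + 1) (H - 1) + 1) 1).filter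
            (fun r => decide (c ≠ col) || decide (r ≠ row))).map
          (fun r => PySem.Int.toStr (c * H + r)))
  PySem.Str.join ", " out

-- ===== PRECONDITION & SPEC =====
-- Pre_ excludes H ≤ 0: H = 0 raises ZeroDivisionError in both programs, and a negative grid
-- height is outside the function's natural domain — there A's flat-range filter returns
-- accidental values (e.g. A (-1,-3,1) = "0, 2") that B does not reproduce.
def Pre_neighborCellsStr (H : Int) (W : Int) (bin : Int) : Prop := 1 ≤ H
instance (H : Int) (W : Int) (bin : Int) : Decidable (Pre_neighborCellsStr H W bin) := by
  unfold Pre_neighborCellsStr; infer_instance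
def pvWitness_neighborCellsStr : Int × Int × Int := (3, 3, 4)

def Spec_neighborCellsStr (H : Int) (W : Int) (bin : Int) (out : String) : Prop := out = neighborCellsStr_alt H W bin
instance (H : Int) (W : Int) (bin : Int) (out : String) : Decidable (Spec_neighborCellsStr H W bin out) := by unfold Spec_neighborCellsStr; infer_instance

-- ===== CLAIM (what is proved, stated in full; the proofs are below) =====
def Claim_equal_neighborCellsStr : Prop := ∀ (H : Int) (W : Int) (bin : Int), Dom_neighborCellsStr H W bin → Pre_neighborCellsStr H W bin → Spec_neighborCellsStr H W bin (neighborCellsStr H W bin)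


-- ===== LEMMAS AND PROOFS =====

-- Both in-range tests agree: a flat index k*H + rr with 0 ≤ rr < H lies in [0, W*H-1]
-- iff the column k lies in [0, W).
theorem pv_range_iff (H W k rr : Int) (hH : 1 ≤ H) (h0 : 0 ≤ rr) (h1 : rr < H) :
    (0 ≤ k * H + rr ∧ k * H + rr ≤ W * H - 1) ↔ (0 ≤ k ∧ k < W) := by
  constructor
  · rintro ⟨a, b⟩
    constructor
    · by_contra hk; push_neg at hk; nlinarith
    · by_contra hk; push_neg at hk; nlinarith
  · rintro ⟨a, b⟩
    constructor
    · nlinarith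
    · nlinarith

theorem pv_mem_filter_cons (p : Int → Bool) (x : Int) (xs : List Int) (n : Int) :
    n ∈ List.filter p (x :: xs) ↔ (n = x ∧ p x = true) ∨ n ∈ List.filter p xs := by
  simp only [List.mem_filter, List.mem_cons]
  constructor
  · rintro ⟨h | h, hp⟩
    · exact Or.inl ⟨h, h ▸ hp⟩
    · exact Or.inr ⟨h, hp⟩
  · rintro (⟨h, hp⟩ | ⟨h, hp⟩)
    · exact ⟨Or.inl h, h ▸ hp⟩
    · exact ⟨Or.inr h, hp⟩

-- a guarded candidate passes the filter iff its guard holds and the value is in range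
theorem pv_clause_if (g : Prop) [Decidable g] (v n M : Int) :
    (n = (if g then v else -1) ∧
      (decide (0 ≤ (if g then v else -1)) && decide ((if g then v else -1) ≤ M)) = true)
      ↔ (g ∧ n = v ∧ 0 ≤ v ∧ v ≤ M) := by
  split_ifs with hg <;> simp [hg]

theorem pv_clause_plain (v n M : Int) :
    (n = v ∧ (decide (0 ≤ v) && decide (v ≤ M)) = true) ↔ (n = v ∧ 0 ≤ v ∧ v ≤ M) := by
  simp

-- membership in A's filtered candidate list, in coordinate form (c = column, r = row of bin)
theorem pv_memA (H W c r n : Int) (hH : 1 ≤ H) (h0 : 0 ≤ r) (h1 : r < H) :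
    (n ∈ List.filter (fun n => decide (0 ≤ n) && decide (n ≤ W * H - 1))
        [c * H + r + H, if r < H - 1 then c * H + r + H + 1 else -1,
          if r ≠ 0 then c * H + r + H - 1 else -1, c * H + r - H,
          if r < H - 1 then c * H + r - H + 1 else -1, if r ≠ 0 then c * H + r - H - 1 else -1,
          if r < H - 1 then c * H + r + 1 else -1, if r ≠ 0 then c * H + r - 1 else -1])
      ↔ ((0 ≤ c + 1 ∧ c + 1 < W ∧ n = c * H + r + H)
        ∨ (r < H - 1 ∧ 0 ≤ c + 1 ∧ c + 1 < W ∧ n = c * H + r + H + 1)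
        ∨ (r ≠ 0 ∧ 0 ≤ c + 1 ∧ c + 1 < W ∧ n = c * H + r + H - 1)
        ∨ (0 ≤ c - 1 ∧ c - 1 < W ∧ n = c * H + r - H)
        ∨ (r < H - 1 ∧ 0 ≤ c - 1 ∧ c - 1 < W ∧ n = c * H + r - H + 1)
        ∨ (r ≠ 0 ∧ 0 ≤ c - 1 ∧ c - 1 < W ∧ n = c * H + r - H - 1)
        ∨ (r < H - 1 ∧ 0 ≤ c ∧ c < W ∧ n = c * H + r + 1)
        ∨ (r ≠ 0 ∧ 0 ≤ c ∧ c < W ∧ n = c * H + r - 1)) := by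
  rw [pv_mem_filter_cons, pv_mem_filter_cons, pv_mem_filter_cons, pv_mem_filter_cons,
    pv_mem_filter_cons, pv_mem_filter_cons, pv_mem_filter_cons, pv_mem_filter_cons]
  simp only [List.filter_nil, List.not_mem_nil, or_false]
  rw [pv_clause_plain, pv_clause_if, pv_clause_if, pv_clause_plain, pv_clause_if, pv_clause_if,
    pv_clause_if, pv_clause_if]
  apply or_congr
  · rw [show c * H + r + H = (c + 1) * H + r by ring,
      pv_range_iff H W (c + 1) r hH h0 h1]
    tauto
  apply or_congr
  · rw [show c * H + r + H + 1 = (c + 1) * H + (r + 1) by ring]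
    constructor
    · rintro ⟨hg, hn, hb⟩
      rw [pv_range_iff H W (c + 1) (r + 1) hH (by omega) (by omega)] at hb
      exact ⟨hg, hb.1, hb.2, hn⟩
    · rintro ⟨hg, hb1, hb2, hn⟩
      exact ⟨hg, hn, (pv_range_iff H W (c + 1) (r + 1) hH (by omega) (by omega)).mpr ⟨hb1, hb2⟩⟩
  apply or_congr
  · rw [show c * H + r + H - 1 = (c + 1) * H + (r - 1) by ring]
    constructor
    · rintro ⟨hg, hn, hb⟩
      rw [pv_range_iff H W (c + 1) (r - 1) hH (by omega) (by omega)] at hb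
      exact ⟨hg, hb.1, hb.2, hn⟩
    · rintro ⟨hg, hb1, hb2, hn⟩
      exact ⟨hg, hn, (pv_range_iff H W (c + 1) (r - 1) hH (by omega) (by omega)).mpr ⟨hb1, hb2⟩⟩
  apply or_congr
  · rw [show c * H + r - H = (c - 1) * H + r by ring,
      pv_range_iff H W (c - 1) r hH h0 h1]
    tauto
  apply or_congr
  · rw [show c * H + r - H + 1 = (c - 1) * H + (r + 1) by ring]
    constructor
    · rintro ⟨hg, hn, hb⟩
      rw [pv_range_iff H W (c - 1) (r + 1) hH (by omega) (by omega)] at hb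
      exact ⟨hg, hb.1, hb.2, hn⟩
    · rintro ⟨hg, hb1, hb2, hn⟩
      exact ⟨hg, hn, (pv_range_iff H W (c - 1) (r + 1) hH (by omega) (by omega)).mpr ⟨hb1, hb2⟩⟩
  apply or_congr
  · rw [show c * H + r - H - 1 = (c - 1) * H + (r - 1) by ring]
    constructor
    · rintro ⟨hg, hn, hb⟩
      rw [pv_range_iff H W (c - 1) (r - 1) hH (by omega) (by omega)] at hb
      exact ⟨hg, hb.1, hb.2, hn⟩
    · rintro ⟨hg, hb1, hb2, hn⟩
      exact ⟨hg, hn, (pv_range_iff H W (c - 1) (r - 1) hH (by omega) (by omega)).mpr ⟨hb1, hb2⟩⟩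
  apply or_congr
  · rw [show c * H + r + 1 = c * H + (r + 1) by ring]
    constructor
    · rintro ⟨hg, hn, hb⟩
      rw [pv_range_iff H W c (r + 1) hH (by omega) (by omega)] at hb
      exact ⟨hg, hb.1, hb.2, hn⟩
    · rintro ⟨hg, hb1, hb2, hn⟩
      exact ⟨hg, hn, (pv_range_iff H W c (r + 1) hH (by omega) (by omega)).mpr ⟨hb1, hb2⟩⟩
  · rw [show c * H + r - 1 = c * H + (r - 1) by ring]
    constructor
    · rintro ⟨hg, hn, hb⟩
      rw [pv_range_iff H W c (r - 1) hH (by omega) (by omega)] at hb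
      exact ⟨hg, hb.1, hb.2, hn⟩
    · rintro ⟨hg, hb1, hb2, hn⟩
      exact ⟨hg, hn, (pv_range_iff H W c (r - 1) hH (by omega) (by omega)).mpr ⟨hb1, hb2⟩⟩

-- B's index list: the clamped 3x3 window traversed column-major, cell itself excluded
theorem pv_memB (H W c r n : Int) :
    (n ∈ (PySem.List.pyRange (max (c - 1) 0) (min (c + 1) (W - 1) + 1) 1).flatMap
        (fun cc =>
          ((PySem.List.pyRange (max (r - 1) 0) (min (r + 1) (H - 1) + 1) 1).filter
              (fun rr => decide (cc ≠ c) || decide (rr ≠ r))).map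
            (fun rr => cc * H + rr)))
      ↔ (∃ cc rr, (c - 1 ≤ cc ∧ cc ≤ c + 1 ∧ 0 ≤ cc ∧ cc < W)
          ∧ (r - 1 ≤ rr ∧ rr ≤ r + 1 ∧ 0 ≤ rr ∧ rr < H)
          ∧ (cc ≠ c ∨ rr ≠ r) ∧ n = cc * H + rr) := by
  simp only [List.mem_flatMap, List.mem_map, List.mem_filter, PySem.List.mem_pyRange_one,
    Bool.or_eq_true, decide_eq_true_eq]
  constructor
  · rintro ⟨cc, hcc, rr, ⟨⟨hrr, hne⟩, hn⟩⟩
    exact ⟨cc, rr, ⟨by omega, by omega, by omega, by omega⟩,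
      ⟨by omega, by omega, by omega, by omega⟩, hne, hn.symm⟩
  · rintro ⟨cc, rr, hcc, hrr, hne, hn⟩
    exact ⟨cc, ⟨by omega, by omega⟩, rr, ⟨⟨⟨by omega, by omega⟩, hne⟩, hn.symm⟩⟩

-- the two membership characterisations coincide
theorem pv_mem_iff (H W c r n : Int) (hH : 1 ≤ H) (h0 : 0 ≤ r) (h1 : r < H) :
    ((0 ≤ c + 1 ∧ c + 1 < W ∧ n = c * H + r + H)
        ∨ (r < H - 1 ∧ 0 ≤ c + 1 ∧ c + 1 < W ∧ n = c * H + r + H + 1)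
        ∨ (r ≠ 0 ∧ 0 ≤ c + 1 ∧ c + 1 < W ∧ n = c * H + r + H - 1)
        ∨ (0 ≤ c - 1 ∧ c - 1 < W ∧ n = c * H + r - H)
        ∨ (r < H - 1 ∧ 0 ≤ c - 1 ∧ c - 1 < W ∧ n = c * H + r - H + 1)
        ∨ (r ≠ 0 ∧ 0 ≤ c - 1 ∧ c - 1 < W ∧ n = c * H + r - H - 1)
        ∨ (r < H - 1 ∧ 0 ≤ c ∧ c < W ∧ n = c * H + r + 1)
        ∨ (r ≠ 0 ∧ 0 ≤ c ∧ c < W ∧ n = c * H + r - 1))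
      ↔ (∃ cc rr, (c - 1 ≤ cc ∧ cc ≤ c + 1 ∧ 0 ≤ cc ∧ cc < W)
          ∧ (r - 1 ≤ rr ∧ rr ≤ r + 1 ∧ 0 ≤ rr ∧ rr < H)
          ∧ (cc ≠ c ∨ rr ≠ r) ∧ n = cc * H + rr) := by
  constructor
  · rintro (⟨a, b, hn⟩ | ⟨g, a, b, hn⟩ | ⟨g, a, b, hn⟩ | ⟨a, b, hn⟩ | ⟨g, a, b, hn⟩ |
      ⟨g, a, b, hn⟩ | ⟨g, a, b, hn⟩ | ⟨g, a, b, hn⟩)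
    · exact ⟨c + 1, r, ⟨by omega, by omega, a, b⟩, ⟨by omega, by omega, h0, h1⟩,
        Or.inl (by omega), by rw [hn]; ring⟩
    · exact ⟨c + 1, r + 1, ⟨by omega, by omega, a, b⟩, ⟨by omega, by omega, by omega, by omega⟩,
        Or.inl (by omega), by rw [hn]; ring⟩
    · exact ⟨c + 1, r - 1, ⟨by omega, by omega, a, b⟩, ⟨by omega, by omega, by omega, by omega⟩,
        Or.inl (by omega), by rw [hn]; ring⟩
    · exact ⟨c - 1, r, ⟨by omega, by omega, a, b⟩, ⟨by omega, by omega, h0, h1⟩,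
        Or.inl (by omega), by rw [hn]; ring⟩
    · exact ⟨c - 1, r + 1, ⟨by omega, by omega, a, b⟩, ⟨by omega, by omega, by omega, by omega⟩,
        Or.inl (by omega), by rw [hn]; ring⟩
    · exact ⟨c - 1, r - 1, ⟨by omega, by omega, a, b⟩, ⟨by omega, by omega, by omega, by omega⟩,
        Or.inl (by omega), by rw [hn]; ring⟩
    · exact ⟨c, r + 1, ⟨by omega, by omega, a, b⟩, ⟨by omega, by omega, by omega, by omega⟩,
        Or.inr (by omega), by rw [hn]; ring⟩
    · exact ⟨c, r - 1, ⟨by omega, by omega, a, b⟩, ⟨by omega, by omega, by omega, by omega⟩,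
        Or.inr (by omega), by rw [hn]; ring⟩
  · rintro ⟨cc, rr, hcc, hrr, hne, hn⟩
    have hc3 : cc = c - 1 ∨ cc = c ∨ cc = c + 1 := by omega
    have hr3 : rr = r - 1 ∨ rr = r ∨ rr = r + 1 := by omega
    rcases hc3 with rfl | rfl | rfl <;> rcases hr3 with rfl | rfl | rfl
    · exact Or.inr (Or.inr (Or.inr (Or.inr (Or.inr (Or.inl
        ⟨by omega, by omega, by omega, by rw [hn]; ring⟩)))))
    · exact Or.inr (Or.inr (Or.inr (Or.inl ⟨by omega, by omega, by rw [hn]; ring⟩)))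
    · exact Or.inr (Or.inr (Or.inr (Or.inr (Or.inl
        ⟨by omega, by omega, by omega, by rw [hn]; ring⟩))))
    · exact Or.inr (Or.inr (Or.inr (Or.inr (Or.inr (Or.inr (Or.inr
        ⟨by omega, by omega, by omega, by rw [hn]; ring⟩))))))
    · exact absurd hne (by omega)
    · exact Or.inr (Or.inr (Or.inr (Or.inr (Or.inr (Or.inr (Or.inl
        ⟨by omega, by omega, by omega, by rw [hn]; ring⟩))))))
    · exact Or.inr (Or.inr (Or.inl ⟨by omega, by omega, by omega, by rw [hn]; ring⟩))
    · exact Or.inl ⟨by omega, by omega, by rw [hn]; ring⟩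
    · exact Or.inr (Or.inl ⟨by omega, by omega, by omega, by rw [hn]; ring⟩)

-- A's filtered candidate list has no duplicates
theorem pv_nodupA (H W c r : Int) (hH : 1 ≤ H) (h0 : 0 ≤ r) (h1 : r < H) :
    (List.filter (fun n => decide (0 ≤ n) && decide (n ≤ W * H - 1))
        [c * H + r + H, if r < H - 1 then c * H + r + H + 1 else -1,
          if r ≠ 0 then c * H + r + H - 1 else -1, c * H + r - H,
          if r < H - 1 then c * H + r - H + 1 else -1, if r ≠ 0 then c * H + r - H - 1 else -1,
          if r < H - 1 then c * H + r + 1 else -1, if r ≠ 0 then c * H + r - 1 else -1]).Nodup := by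
  show List.Pairwise _ _
  rw [List.pairwise_filter]
  obtain ⟨M, hM⟩ : ∃ M, W * H - 1 = M := ⟨_, rfl⟩
  rw [hM]
  obtain ⟨t, ht⟩ : ∃ t, c * H = t := ⟨_, rfl⟩
  rw [ht]
  split_ifs with hg1 hg2 hg2 <;>
    · simp only [List.pairwise_cons, List.mem_cons, List.not_mem_nil, or_false,
        forall_eq_or_imp, forall_eq, Bool.and_eq_true, decide_eq_true_eq, List.Pairwise.nil,
        and_true, IsEmpty.forall_iff, implies_true]
      omega

-- strictly increasing pieces with strictly separated blocks concatenate to a strictly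
-- increasing flatMap
theorem pv_flatMap_pairwise (f : Int → List Int) (l : List Int) (hl : l.Pairwise (· < ·))
    (hf : ∀ a ∈ l, (f a).Pairwise (· < ·))
    (hcross : ∀ a ∈ l, ∀ b ∈ l, a < b → ∀ x ∈ f a, ∀ y ∈ f b, x < y) :
    (l.flatMap f).Pairwise (· < ·) := by
  induction l with
  | nil => simp
  | cons a l ih =>
    rw [List.flatMap_cons, List.pairwise_append]
    refine ⟨hf a List.mem_cons_self, ?_, ?_⟩
    · exact ih (hl.sublist (List.sublist_cons_self a l))
        (fun b hb => hf b (List.mem_cons_of_mem a hb))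
        (fun b hb b' hb' => hcross b (List.mem_cons_of_mem a hb) b' (List.mem_cons_of_mem a hb'))
    · intro x hx y hy
      obtain ⟨b, hb, hyb⟩ := List.mem_flatMap.mp hy
      have hab : a < b := (List.pairwise_cons.mp hl).1 b hb
      exact hcross a List.mem_cons_self b (List.mem_cons_of_mem a hb) hab x hx y hyb

-- B's index list is strictly increasing
theorem pv_pairwiseB (H W c r : Int) (hH : 1 ≤ H) :
    ((PySem.List.pyRange (max (c - 1) 0) (min (c + 1) (W - 1) + 1) 1).flatMap
        (fun cc =>
          ((PySem.List.pyRange (max (r - 1) 0) (min (r + 1) (H - 1) + 1) 1).filter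
              (fun rr => decide (cc ≠ c) || decide (rr ≠ r))).map
            (fun rr => cc * H + rr))).Pairwise (· < ·) := by
  apply pv_flatMap_pairwise
  · exact PySem.List.pairwise_lt_pyRange_one _ _
  · intro a _
    apply List.Pairwise.map
    · exact fun x y (hxy : x < y) => by
        show a * H + x < a * H + y
        omega
    · exact (PySem.List.pairwise_lt_pyRange_one _ _).filter _
  · intro a _ b _ hab x hx y hy
    obtain ⟨rx, hrx, hxe⟩ := List.mem_map.mp hx
    obtain ⟨ry, hry, hye⟩ := List.mem_map.mp hy
    have hrx' := PySem.List.mem_pyRange_one.mp (List.mem_of_mem_filter hrx)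
    have hry' := PySem.List.mem_pyRange_one.mp (List.mem_of_mem_filter hry)
    subst hxe hye
    have h1 : rx < H := by omega
    have h2 : 0 ≤ ry := by omega
    have h3 : a + 1 ≤ b := by omega
    nlinarith [mul_le_mul_of_nonneg_right h3 (by omega : (0:Int) ≤ H)]

theorem pv_digitChar_ok (k : Nat) : ([',', ' '].contains (Nat.digitChar k)) = false := by
  match k with
  | 0 | 1 | 2 | 3 | 4 | 5 | 6 | 7 | 8 | 9 | 10 | 11 | 12 | 13 | 14 | 15 => decide
  | (n+16) => rfl

theorem pv_toDigitsCore_ok (f : Nat) : ∀ (n : Nat) (ds : List Char),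
    (∀ c ∈ ds, ([',', ' '].contains c) = false) →
    ∀ c ∈ Nat.toDigitsCore 10 f n ds, ([',', ' '].contains c) = false := by
  induction f with
  | zero => intro n ds h c hc; simp [Nat.toDigitsCore] at hc; exact h c hc
  | succ f ih =>
    intro n ds h c hc
    simp only [Nat.toDigitsCore] at hc
    split at hc
    · cases hc with
      | head => exact pv_digitChar_ok _
      | tail _ hc => exact h c hc
    · refine ih _ _ ?_ c hc
      intro c' hc'
      cases hc' with
      | head => exact pv_digitChar_ok _
      | tail _ hc' => exact h c' hc'

theorem pv_toDigitsCore_ne_nil (f : Nat) : ∀ (n : Nat) (ds : List Char),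
    ds ≠ [] → Nat.toDigitsCore 10 f n ds ≠ [] := by
  induction f with
  | zero => intro n ds h; simpa [Nat.toDigitsCore] using h
  | succ f ih =>
    intro n ds h
    simp only [Nat.toDigitsCore]
    split
    · simp
    · exact ih _ _ (by simp)

theorem pv_toChars_ok (n : Int) : ∀ c ∈ PySem.Int.toChars n, ([',', ' '].contains c) = false := by
  unfold PySem.Int.toChars
  split
  · intro c hc
    cases hc with
    | head => decide
    | tail _ hc => exact pv_toDigitsCore_ok _ _ _ (by simp) c hc
  · intro c hc
    exact pv_toDigitsCore_ok _ _ _ (by simp) c hc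

theorem pv_toChars_ne_nil (n : Int) : PySem.Int.toChars n ≠ [] := by
  unfold PySem.Int.toChars Nat.toDigits
  split
  · simp
  · simp only [Nat.toDigitsCore]
    split
    · simp
    · exact pv_toDigitsCore_ne_nil _ _ _ (by simp)

theorem pv_fold_toList (l : List Int) (s : String) :
    (l.foldl (fun s item => s ++ PySem.Int.toStr item ++ ", ") s).toList
      = l.foldl (fun cs item => cs ++ PySem.Int.toChars item ++ [',', ' ']) s.toList := by
  induction l generalizing s with
  | nil => rfl
  | cons x xs ih =>
    simp only [List.foldl_cons, ih]
    congr 1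
    simp [PySem.Int.toList_toStr]

theorem pv_foldC_flat (l : List Int) (acc : List Char) :
    l.foldl (fun cs item => cs ++ PySem.Int.toChars item ++ [',', ' ']) acc
      = acc ++ l.flatMap (fun i => PySem.Int.toChars i ++ [',', ' ']) := by
  induction l generalizing acc with
  | nil => simp
  | cons x xs ih => simp [List.flatMap_def, List.append_assoc]

theorem pv_flat_join (x : Int) (xs : List Int) :
    (x :: xs).flatMap (fun i => PySem.Int.toChars i ++ [',', ' '])
      = PySem.Chars.join [',', ' '] ((x :: xs).map PySem.Int.toChars) ++ [',', ' '] := by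
  induction xs generalizing x with
  | nil => simp [PySem.Chars.join_singleton]
  | cons y ys ih =>
    rw [List.flatMap_cons, ih y]
    conv_rhs => rw [List.map_cons, List.map_cons, PySem.Chars.join_cons_cons]
    simp [List.append_assoc]

theorem pv_strip_ready (c : Char) (cs : List Char)
    (hc : ([',', ' '].contains c) = false)
    (hlast : ([',', ' '].contains ((c :: cs).getLast (by simp))) = false) :
    PySem.Chars.stripChars ((c :: cs) ++ [',', ' ']) [',', ' '] = c :: cs := by
  show (List.dropWhile (fun c => [',', ' '].contains c)
      (List.dropWhile (fun c => [',', ' '].contains c) ((c :: cs) ++ [',', ' '])).reverse).reverse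
      = c :: cs
  have h1 : List.dropWhile (fun c => [',', ' '].contains c) ((c :: cs) ++ [',', ' '])
      = (c :: cs) ++ [',', ' '] := by
    rw [List.cons_append, List.dropWhile_cons, hc]
    simp
  rw [h1]
  have hrev : ((c :: cs) ++ [',', ' ']).reverse = ' ' :: ',' :: (c :: cs).reverse := by
    simp
  rw [hrev]
  rw [List.dropWhile_cons, if_pos (by decide), List.dropWhile_cons, if_pos (by decide)]
  have hdecomp : (c :: cs).reverse
      = (c :: cs).getLast (by simp) :: (c :: cs).dropLast.reverse := by
    conv_lhs => rw [← List.dropLast_append_getLast (l := c :: cs) (by simp)]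
    simp
  rw [hdecomp, List.dropWhile_cons, hlast]
  simp only [Bool.false_eq_true, if_false]
  rw [← hdecomp]
  simp

theorem pv_join_head (x : Int) (xs : List Int) :
    ∃ T, PySem.Chars.join [',', ' '] ((x :: xs).map PySem.Int.toChars)
        = PySem.Int.toChars x ++ T := by
  cases xs with
  | nil => exact ⟨[], by simp [PySem.Chars.join_singleton]⟩
  | cons y ys =>
    exact ⟨[',', ' '] ++ PySem.Chars.join [',', ' '] ((y :: ys).map PySem.Int.toChars),
      by simp [PySem.Chars.join_cons_cons, List.append_assoc]⟩

theorem pv_join_last (xs : List Int) (x : Int) :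
    ∃ I, PySem.Chars.join [',', ' '] ((xs ++ [x]).map PySem.Int.toChars)
        = I ++ PySem.Int.toChars x := by
  induction xs with
  | nil => exact ⟨[], by simp [PySem.Chars.join_singleton]⟩
  | cons y ys ih =>
    obtain ⟨I, hI⟩ := ih
    cases hys : (ys ++ [x]).map PySem.Int.toChars with
    | nil => simp at hys
    | cons q rest =>
      refine ⟨PySem.Int.toChars y ++ [',', ' '] ++ I, ?_⟩
      rw [List.cons_append, List.map_cons, hys, PySem.Chars.join_cons_cons, ← hys, hI]
      simp [List.append_assoc]

theorem pv_build_eq (l : List Int) :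
    PySem.Str.stripChars (l.foldl (fun s item => s ++ PySem.Int.toStr item ++ ", ") "") ", "
      = PySem.Str.join ", " (l.map PySem.Int.toStr) := by
  rw [← String.toList_inj]
  rw [PySem.Str.toList_stripChars, PySem.Str.toList_join, pv_fold_toList]
  have hsep : (", " : String).toList = [',', ' '] := by decide
  have hnil : ("" : String).toList = [] := by decide
  rw [hsep, hnil, pv_foldC_flat]
  have hmap : (l.map PySem.Int.toStr).map String.toList = l.map PySem.Int.toChars := by
    simp [List.map_map, Function.comp, PySem.Int.toList_toStr]
  rw [hmap]
  cases l with
  | nil => decide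
  | cons x xs =>
    rw [List.nil_append, pv_flat_join]
    obtain ⟨T, hT⟩ := pv_join_head x xs
    obtain ⟨ch, ct, hx⟩ : ∃ ch ct, PySem.Int.toChars x = ch :: ct := by
      cases h : PySem.Int.toChars x with
      | nil => exact absurd h (pv_toChars_ne_nil x)
      | cons a b => exact ⟨a, b, rfl⟩
    have hG : PySem.Chars.join [',', ' '] ((x :: xs).map PySem.Int.toChars)
        = ch :: (ct ++ T) := by rw [hT, hx]; simp
    obtain ⟨ys, y, hxy⟩ : ∃ ys y, x :: xs = ys ++ [y] := by
      refine ⟨(x :: xs).dropLast, (x :: xs).getLast (by simp), ?_⟩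
      exact (List.dropLast_append_getLast _).symm
    obtain ⟨I, hI⟩ := pv_join_last ys y
    have hlast : ([',', ' '].contains
        ((ch :: (ct ++ T)).getLast (by simp))) = false := by
      have h1 : (ch :: (ct ++ T)) = I ++ PySem.Int.toChars y := by
        rw [← hG, hxy]; exact hI
      have hy := pv_toChars_ne_nil y
      have h2 : (ch :: (ct ++ T)).getLast (by simp) ∈ PySem.Int.toChars y := by
        apply List.mem_of_getLast?
        rw [← List.getLast?_eq_some_getLast (by simp), h1,
          List.getLast?_append_of_ne_nil _ hy]
      exact pv_toChars_ok y _ h2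
    have hch : ([',', ' '].contains ch) = false := by
      apply pv_toChars_ok x
      rw [hx]; exact List.mem_cons_self
    rw [hG, pv_strip_ready ch (ct ++ T) hch hlast]


-- ===== VERDICT (by name: the statement is the Claim_ definition above) =====
theorem neighborCellsStr_spec : Claim_equal_neighborCellsStr := by
  intro H W bin _ hPre
  unfold Spec_neighborCellsStr
  have hH : (1:Int) ≤ H := hPre
  have hPos : (0:Int) < H := by omega
  obtain ⟨r, hr⟩ : ∃ r, PySem.Int.mod bin H = r := ⟨_, rfl⟩
  obtain ⟨c, hcol⟩ : ∃ c, PySem.Int.floordiv bin H = c := ⟨_, rfl⟩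
  have hr0 : 0 ≤ r := hr ▸ PySem.Int.mod_nonneg bin hPos
  have hrH : r < H := hr ▸ PySem.Int.mod_lt bin hPos
  have hbin : c * H + r = bin := by rw [← hr, ← hcol]; exact PySem.Int.floordiv_mul_add_mod bin H
  unfold neighborCellsStr neighborCellsStr_alt
  rw [hr, hcol]
  subst hbin
  dsimp only
  -- B's index list
  obtain ⟨Bidx, hBidx⟩ : ∃ Bidx,
      (PySem.List.pyRange (max (c - 1) 0) (min (c + 1) (W - 1) + 1) 1).flatMap
        (fun cc =>
          ((PySem.List.pyRange (max (r - 1) 0) (min (r + 1) (H - 1) + 1) 1).filter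
              (fun rr => decide (cc ≠ c) || decide (rr ≠ r))).map
            (fun rr => cc * H + rr)) = Bidx := ⟨_, rfl⟩
  -- B's string list equals the map of toStr over its index list
  have hBstr :
      (PySem.List.pyRange (max (c - 1) 0) (min (c + 1) (W - 1) + 1) 1).flatMap
        (fun cc =>
          ((PySem.List.pyRange (max (r - 1) 0) (min (r + 1) (H - 1) + 1) 1).filter
              (fun rr => decide (cc ≠ c) || decide (rr ≠ r))).map
            (fun rr => PySem.Int.toStr (cc * H + rr)))
        = Bidx.map PySem.Int.toStr := by
    rw [← hBidx, List.map_flatMap]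
    simp [List.map_map, Function.comp_def]
  rw [hBstr]
  -- A's filtered candidate list
  obtain ⟨Aneigh, hAneigh⟩ : ∃ A,
      List.filter (fun n => decide (0 ≤ n) && decide (n ≤ W * H - 1))
        [c * H + r + H, if r < H - 1 then c * H + r + H + 1 else -1,
          if r ≠ 0 then c * H + r + H - 1 else -1, c * H + r - H,
          if r < H - 1 then c * H + r - H + 1 else -1, if r ≠ 0 then c * H + r - H - 1 else -1,
          if r < H - 1 then c * H + r + 1 else -1, if r ≠ 0 then c * H + r - 1 else -1] = A :=
    ⟨_, rfl⟩
  rw [hAneigh]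
  -- the sorted A-list IS B's index list
  have hperm : Bidx.Perm Aneigh := by
    rw [List.perm_ext_iff_of_nodup
      ((hBidx ▸ pv_pairwiseB H W c r hH).imp ne_of_lt)
      (hAneigh ▸ pv_nodupA H W c r hH hr0 hrH)]
    intro n
    rw [← hBidx, ← hAneigh, pv_memB, pv_memA H W c r n hH hr0 hrH, pv_mem_iff H W c r n hH hr0 hrH]
  have hsorted : PySem.List.sorted Aneigh (fun x => x) false = Bidx :=
    PySem.List.sorted_eq_of_perm_of_pairwise_lt Aneigh Bidx (fun x => x) hperm
      (hBidx ▸ pv_pairwiseB H W c r hH)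
  rw [hsorted, pv_build_eq]
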